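-- pv_equiv track=rewrite | github.com/DimiHepburn/neuro-ai-bridge | scripts/py_to_ipynb.py | _parse_cells
-- ===== SOURCE A (Python) =====
-- from typing import Iterable, List, Tuple
--
-- CELL_MARK = "# %%"
--
-- MARKDOWN_MARK = "# %% [markdown]"
--
-- def _parse_cells(source: str) -> List[Tuple[str, str]]:
--     """
--     Split a source file into (cell_type, body) tuples.
--
--     Rules
--     -----
--     * Lines that start with ``# %% [markdown]`` open a markdown cell.
--     * Lines that start with ``# %%`` (no `[markdown]`) open a code cell.
--     * Everything before the first marker is treated as a leading code cell
--       (useful for imports / headers).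
--     * Inside markdown cells, leading ``# `` / ``#`` on each line is
--       stripped so the comments render as real markdown.
--     """
--     lines = source.splitlines()
--     cells: List[Tuple[str, List[str]]] = []
--     current_type = "code"
--     current_body: List[str] = []
--
--     def flush():
--         if current_body and any(l.strip() for l in current_body):
--             cells.append((current_type, current_body.copy()))
--         current_body.clear()
--
--     for line in lines:
--         stripped = line.lstrip()
--         if stripped.startswith(MARKDOWN_MARK):
--             flush()
--             current_type = "markdown"
--             continue
--         if stripped.startswith(CELL_MARK):
--             flush()
--             current_type = "code"
--             continue
--         current_body.append(line)
--
--     flush()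
--
--     # Convert markdown cell bodies: strip leading `# ` / `#` per line.
--     parsed: List[Tuple[str, str]] = []
--     for ctype, body in cells:
--         if ctype == "markdown":
--             md_lines = []
--             for l in body:
--                 s = l.lstrip()
--                 if s.startswith("# "):
--                     md_lines.append(l[l.index("# ") + 2 :])
--                 elif s.startswith("#"):
--                     md_lines.append(l[l.index("#") + 1 :])
--                 else:
--                     md_lines.append(l)
--             parsed.append(("markdown", "\n".join(md_lines).strip("\n")))
--         else:
--             parsed.append(("code", "\n".join(body).strip("\n")))
--
--     return parsed
-- ===== SOURCE B (Python) =====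
-- CELL_MARK = "# %%"
--
-- MARKDOWN_MARK = "# %% [markdown]"
--
--
-- def _parse_cells(source):
--     """One-pass variant: convert markdown lines as they arrive and flush
--     finished cells immediately, instead of collecting raw bodies and
--     post-processing them in a second loop."""
--     cells = []
--     ctype = "code"
--     conv = []      # already-converted body lines of the current cell
--     seen = False   # whether any RAW line of the current cell is non-blank
--
--     for line in source.splitlines():
--         s = line.lstrip()
--         if s.startswith(MARKDOWN_MARK) or s.startswith(CELL_MARK):
--             if seen:
--                 cells.append((ctype, "\n".join(conv).strip("\n")))
--             conv = []
--             seen = False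
--             ctype = "markdown" if s.startswith(MARKDOWN_MARK) else "code"
--         else:
--             seen = seen or bool(line.strip())
--             if ctype == "markdown":
--                 conv.append(s[2:] if s.startswith("# ") else s[1:] if s.startswith("#") else line)
--             else:
--                 conv.append(line)
--     if seen:
--         cells.append((ctype, "\n".join(conv).strip("\n")))
--     return cells
-- ===== Notes on version B (the rewrite author's own statement) =====
-- stated objective: simpler
-- what changed: B does everything in one pass — converting markdown lines as they arrive and flushing each finished cell immediately with a raw-non-blank flag — instead of A's two phases (collect raw bodies via flush(), then a second loop that converts markdown bodies and joins).
import Mathlib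
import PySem

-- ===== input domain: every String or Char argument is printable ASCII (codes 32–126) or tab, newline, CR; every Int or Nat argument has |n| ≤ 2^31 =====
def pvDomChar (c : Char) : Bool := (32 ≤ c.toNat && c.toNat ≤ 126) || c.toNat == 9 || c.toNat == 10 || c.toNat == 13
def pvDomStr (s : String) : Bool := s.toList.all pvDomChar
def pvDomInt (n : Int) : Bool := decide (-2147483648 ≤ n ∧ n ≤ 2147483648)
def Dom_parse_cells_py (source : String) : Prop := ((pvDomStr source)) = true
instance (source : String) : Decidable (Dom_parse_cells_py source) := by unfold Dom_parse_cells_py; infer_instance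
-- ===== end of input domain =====

-- B replaces A's two-phase parse (collect raw bodies, then a second conversion loop)
-- by a single pass that converts markdown lines as they arrive and flushes cells
-- immediately (objective: simpler decomposition, same cost).

-- ===== PORT A =====
def pvMdMark : List Char := "# %% [markdown]".toList
def pvCellMark : List Char := "# %%".toList

-- flush(): append (type, body) if body has a non-blank line, clear body
def pvFlushA (st : List (String × List (List Char)) × String × List (List Char)) :
    List (String × List (List Char)) :=
  if !st.2.2.isEmpty && st.2.2.any (fun l => !(PySem.Chars.strip l).isEmpty) then
    st.1 ++ [(st.2.1, st.2.2)]
  else st.1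

def pvStepA (st : List (String × List (List Char)) × String × List (List Char))
    (line : List Char) : List (String × List (List Char)) × String × List (List Char) :=
  let stripped := PySem.Chars.lstrip line
  if PySem.Chars.startswith stripped pvMdMark then (pvFlushA st, "markdown", [])
  else if PySem.Chars.startswith stripped pvCellMark then (pvFlushA st, "code", [])
  else (st.1, st.2.1, st.2.2 ++ [line])

-- markdown-body line: l[l.index("# ")+2:] / l[l.index("#")+1:] / l.
-- (Python's l.index raises when the substring is absent; under the startswith guard it is
-- present, and there Chars.find = l.index, so the port is exact.)
def pvMdLineA (l : List Char) : List Char :=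
  let s := PySem.Chars.lstrip l
  if PySem.Chars.startswith s ['#', ' '] then
    PySem.List.slice l (some (PySem.Chars.find l ['#', ' '] + 2)) none
  else if PySem.Chars.startswith s ['#'] then
    PySem.List.slice l (some (PySem.Chars.find l ['#'] + 1)) none
  else l

-- one iteration of A's second loop: ("markdown"/"code", "\n".join(…).strip("\n"))
def pvConvA (cell : String × List (List Char)) : String × String :=
  if cell.1 == "markdown" then
    ("markdown", String.ofList (PySem.Chars.stripChars
      (PySem.Chars.join ['\n'] (cell.2.map pvMdLineA)) ['\n']))
  else
    ("code", String.ofList (PySem.Chars.stripChars (PySem.Chars.join ['\n'] cell.2) ['\n']))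

def parse_cells_py (source : String) : List (String × String) :=
  let lines := PySem.Chars.splitlines source.toList
  let st := lines.foldl pvStepA ([], "code", [])
  let cells := pvFlushA st
  cells.foldl (fun parsed c => parsed ++ [pvConvA c]) []

-- ===== PORT B =====
-- inline markdown conversion of Source B: s[2:] / s[1:] / line  (s = line.lstrip())
def pvConvLineB (s line : List Char) : List Char :=
  if PySem.Chars.startswith s ['#', ' '] then s.drop 2
  else if PySem.Chars.startswith s ['#'] then s.drop 1
  else line

-- if seen: cells.append((ctype, "\n".join(conv).strip("\n")))
def pvEmitB (st : List (String × String) × String × List (List Char) × Bool) :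
    List (String × String) :=
  if st.2.2.2 then
    st.1 ++ [(st.2.1, String.ofList (PySem.Chars.stripChars
      (PySem.Chars.join ['\n'] st.2.2.1) ['\n']))]
  else st.1

def pvStepB (st : List (String × String) × String × List (List Char) × Bool)
    (line : List Char) : List (String × String) × String × List (List Char) × Bool :=
  let s := PySem.Chars.lstrip line
  if PySem.Chars.startswith s pvMdMark || PySem.Chars.startswith s pvCellMark then
    (pvEmitB st, (if PySem.Chars.startswith s pvMdMark then "markdown" else "code"), [], false)
  else
    (st.1, st.2.1,
      st.2.2.1 ++ [if st.2.1 == "markdown" then pvConvLineB s line else line],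
      st.2.2.2 || !(PySem.Chars.strip line).isEmpty)

def parse_cells_py_alt (source : String) : List (String × String) :=
  pvEmitB ((PySem.Chars.splitlines source.toList).foldl pvStepB ([], "code", [], false))

-- ===== PRECONDITION & SPEC =====
def Spec_parse_cells_py (source : String) (out : List (String × String)) : Prop := out = parse_cells_py_alt source
instance (source : String) (out : List (String × String)) : Decidable (Spec_parse_cells_py source out) := by unfold Spec_parse_cells_py; infer_instance

-- ===== CLAIM (what is proved, stated in full; the proofs are below) =====
def Claim_equal_parse_cells_py : Prop := ∀ (source : String), Dom_parse_cells_py source → Spec_parse_cells_py source (parse_cells_py source)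

-- ===== LEMMAS AND PROOFS =====

-- abstraction: B's state as a function of A's state
def pvAbsConv (t : String) (body : List (List Char)) : List (List Char) :=
  if t == "markdown" then body.map pvMdLineA else body

def pvAbsSeen (body : List (List Char)) : Bool :=
  body.any (fun l => !(PySem.Chars.strip l).isEmpty)

def pvAbs (st : List (String × List (List Char)) × String × List (List Char)) :
    List (String × String) × String × List (List Char) × Bool :=
  (st.1.map pvConvA, st.2.1, pvAbsConv st.2.1 st.2.2, pvAbsSeen st.2.2)

-- the whitespace prefix removed by lstrip contains no occurrence of a pattern starting with '#'
lemma pv_find_lstrip (l : List Char) (pat : List Char) (c : Char) (rest : List Char)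
    (hpat : pat = c :: rest) (hc : PySem.Chars.isspace c = false)
    (h : PySem.Chars.startswith (PySem.Chars.lstrip l) pat = true) :
    PySem.Chars.find l pat = ((l.length - (PySem.Chars.lstrip l).length : Nat) : Int) ∧
    ∀ k : Nat, PySem.List.slice l (some ((PySem.Chars.find l pat) + (k : Int))) none
      = (PySem.Chars.lstrip l).drop k := by
  have hl : PySem.Chars.lstrip l = l.dropWhile PySem.Chars.isspace := rfl
  have htd : l.takeWhile PySem.Chars.isspace ++ l.dropWhile PySem.Chars.isspace = l :=
    List.takeWhile_append_dropWhile
  have hlen : (l.takeWhile PySem.Chars.isspace).length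
      + (l.dropWhile PySem.Chars.isspace).length = l.length := by
    conv_rhs => rw [← htd]
    exact (List.length_append).symm
  have hdrop : l.drop (l.takeWhile PySem.Chars.isspace).length = l.dropWhile PySem.Chars.isspace := by
    nth_rewrite 2 [← htd]
    exact List.drop_left
  have hocc : pat <+: l.drop (l.takeWhile PySem.Chars.isspace).length := by
    rw [hdrop, ← hl]; exact (PySem.Chars.startswith_iff _ _).1 h
  have hnone : ∀ i, i < (l.takeWhile PySem.Chars.isspace).length → ¬ pat <+: l.drop i := by
    intro i hi hpre
    obtain ⟨t, ht⟩ := hpre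
    have hil : i < l.length := by omega
    have hci : l[i] = c := by
      have h0 : (List.drop i l)[0]? = some c := by rw [← ht]; simp [hpat]
      have h1 : (List.drop i l)[0]? = some l[i] := by
        simp [List.getElem?_drop, List.getElem?_eq_getElem hil]
      rw [h1] at h0
      exact Option.some.inj h0
    have hsp : PySem.Chars.isspace l[i] = true := by
      have hpre2 : l.takeWhile PySem.Chars.isspace <+: l := List.takeWhile_prefix _
      have hgi : (l.takeWhile PySem.Chars.isspace)[i] = l[i] := hpre2.getElem hi
      have hmem : l[i] ∈ l.takeWhile PySem.Chars.isspace := by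
        rw [← hgi]; exact List.getElem_mem _
      exact List.mem_takeWhile_imp hmem
    rw [hci, hc] at hsp
    exact Bool.false_ne_true hsp
  have hinf : pat <:+: l := by
    obtain ⟨t, ht⟩ := hocc
    exact ⟨l.take (l.takeWhile PySem.Chars.isspace).length, t, by
      rw [List.append_assoc, ht, List.take_append_drop]⟩
  have hpos : 0 ≤ PySem.Chars.find l pat := (PySem.Chars.find_nonneg_iff _ _).2 hinf
  obtain ⟨hpref, hmin⟩ := PySem.Chars.find_spec hpos
  have hle : (PySem.Chars.find l pat).toNat ≤ (l.takeWhile PySem.Chars.isspace).length :=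
    Nat.le_of_not_lt (fun hgt => hmin _ hgt hocc)
  have hge : (l.takeWhile PySem.Chars.isspace).length ≤ (PySem.Chars.find l pat).toNat :=
    Nat.le_of_not_lt (fun hgt => hnone _ hgt hpref)
  have hfind : PySem.Chars.find l pat = ((l.takeWhile PySem.Chars.isspace).length : Int) := by
    omega
  have hlen2 : l.length - (PySem.Chars.lstrip l).length
      = (l.takeWhile PySem.Chars.isspace).length := by
    rw [hl]; omega
  refine ⟨by rw [hfind, hlen2], fun k => ?_⟩
  rw [hfind,
    show (((l.takeWhile PySem.Chars.isspace).length : Int) + (k : Int))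
      = (((l.takeWhile PySem.Chars.isspace).length + k : Nat) : Int) by push_cast; ring,
    PySem.List.slice_from_natCast,
    ← List.drop_drop, hdrop, ← hl]

lemma pv_mdline_eq (l : List Char) :
    pvMdLineA l = pvConvLineB (PySem.Chars.lstrip l) l := by
  unfold pvMdLineA pvConvLineB
  by_cases h1 : PySem.Chars.startswith (PySem.Chars.lstrip l) ['#', ' '] = true
  · have h := (pv_find_lstrip l ['#', ' '] '#' [' '] rfl (by decide) h1).2 2
    simp only [h1, if_pos]
    rw [show ((2 : Nat) : Int) = 2 from rfl] at h
    exact h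
  · by_cases h2 : PySem.Chars.startswith (PySem.Chars.lstrip l) ['#'] = true
    · have h := (pv_find_lstrip l ['#'] '#' [] rfl (by decide) h2).2 1
      simp only [h1, h2, if_neg, if_pos, Bool.false_eq_true, not_false_iff]
      rw [show ((1 : Nat) : Int) = 1 from rfl] at h
      exact h
    · simp [h1, h2]

-- A's flush condition equals B's `seen` flag
lemma pv_cond_eq (body : List (List Char)) :
    (!body.isEmpty && body.any (fun l => !(PySem.Chars.strip l).isEmpty)) = pvAbsSeen body := by
  cases body <;> simp [pvAbsSeen]

lemma pv_emit_abs (cells : List (String × List (List Char))) (t : String)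
    (body : List (List Char)) (ht : t = "code" ∨ t = "markdown") :
    pvEmitB (pvAbs (cells, t, body)) = (pvFlushA (cells, t, body)).map pvConvA := by
  unfold pvEmitB pvFlushA pvAbs
  rw [pv_cond_eq body]
  by_cases hs : pvAbsSeen body = true
  · rcases ht with ht | ht <;>
      simp [hs, pvConvA, pvAbsConv, ht]
  · simp [hs]

lemma pv_step_abs (st : List (String × List (List Char)) × String × List (List Char))
    (line : List Char) (ht : st.2.1 = "code" ∨ st.2.1 = "markdown") :
    pvStepB (pvAbs st) line = pvAbs (pvStepA st line) := by
  obtain ⟨cells, t, body⟩ := st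
  have hemit := pv_emit_abs cells t body ht
  by_cases h1 : PySem.Chars.startswith (PySem.Chars.lstrip line) pvMdMark = true
  · simp only [pvStepB, pvStepA, h1]
    simp only [pvAbs, pvAbsConv, pvAbsSeen, beq_iff_eq] at hemit ⊢
    simp [hemit]
  · by_cases h2 : PySem.Chars.startswith (PySem.Chars.lstrip line) pvCellMark = true
    · simp only [pvStepB, pvStepA, h1, h2]
      simp only [pvAbs, pvAbsConv, pvAbsSeen, beq_iff_eq] at hemit ⊢
      simp [hemit]
    · simp only [pvStepB, pvStepA, h1, h2]
      simp only [pvAbs, pvAbsConv, pvAbsSeen]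
      simp [pv_mdline_eq, List.any_append, Bool.or_comm]
      by_cases hmd : t = "markdown" <;> simp [hmd]

lemma pv_fold_abs (lines : List (List Char))
    (st : List (String × List (List Char)) × String × List (List Char))
    (ht : st.2.1 = "code" ∨ st.2.1 = "markdown") :
    lines.foldl pvStepB (pvAbs st) = pvAbs (lines.foldl pvStepA st) ∧
    ((lines.foldl pvStepA st).2.1 = "code" ∨ (lines.foldl pvStepA st).2.1 = "markdown") := by
  induction lines generalizing st with
  | nil => exact ⟨rfl, ht⟩
  | cons x xs ih =>
    have hstep := pv_step_abs st x ht
    have ht' : (pvStepA st x).2.1 = "code" ∨ (pvStepA st x).2.1 = "markdown" := by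
      by_cases h1 : PySem.Chars.startswith (PySem.Chars.lstrip x) pvMdMark = true
      · right; simp [pvStepA, h1]
      · by_cases h2 : PySem.Chars.startswith (PySem.Chars.lstrip x) pvCellMark = true
        · left; simp [pvStepA, h1, h2]
        · simpa [pvStepA, h1, h2] using ht
    simpa [hstep] using ih (pvStepA st x) ht'

-- ===== VERDICT (by name: the statement is the Claim_ definition above) =====
theorem parse_cells_py_spec : Claim_equal_parse_cells_py := by
  intro source _
  unfold Spec_parse_cells_py parse_cells_py parse_cells_py_alt
  have h0 : pvAbs ([], "code", []) = ([], "code", [], false) := rfl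
  have hfold := pv_fold_abs (PySem.Chars.splitlines source.toList) ([], "code", []) (Or.inl rfl)
  rw [PySem.List.foldl_append_singleton_eq_map, ← h0, hfold.1]
  have := pv_emit_abs (PySem.Chars.splitlines source.toList |>.foldl pvStepA ([], "code", [])).1
    (PySem.Chars.splitlines source.toList |>.foldl pvStepA ([], "code", [])).2.1
    (PySem.Chars.splitlines source.toList |>.foldl pvStepA ([], "code", [])).2.2 hfold.2
  simp at this ⊢
  rw [this]
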